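-- pv_equiv track=rewrite | github.com/xinli2/Word-Search | list_of-rows_0_on_top.py | build_rect
-- ===== SOURCE A (Python) =====
-- def build_rect(wid, hei):
--     assert wid >= 3
--     assert hei >= 3
--     lst=[]
--     data=[]
--     lst.append(' ')
--     for index in range(wid-2):
--         lst.append('T')
--     lst.append(' ')
--     data.append(lst)
--
--     for i in range(hei-1):
--         if i >= 1:
--             lst =[]
--             for j in range (wid):
--                 if j<1:
--                     lst.append('L')
--                 elif j>(wid-2):
--                     lst.append('R')
--                 else:
--                     lst.append('.')
--             data.append(lst)
--
--     lst= []
--     lst.append(' ')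
--     for g in range(wid-2):
--         lst.append('B')
--     lst.append(' ')
--     data.append(lst)
--
--     return data
-- ===== SOURCE B (Python) =====
-- def build_rect(wid, hei):
--     assert wid >= 3
--     assert hei >= 3
--     left = [' '] + ['L'] * (hei - 2) + [' ']
--     mid = ['T'] + ['.'] * (hei - 2) + ['B']
--     right = [' '] + ['R'] * (hei - 2) + [' ']
--     cols = [left] + [mid] * (wid - 2) + [right]
--     return [list(row) for row in zip(*cols)]
-- ===== Notes on version B (the rewrite author's own statement) =====
-- stated objective: alternative
-- what changed: B builds the grid column-wise (one left column, a replicated middle column, one right column) and transposes with zip(*cols), instead of A's row-by-row per-cell append loops.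
import Mathlib
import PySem

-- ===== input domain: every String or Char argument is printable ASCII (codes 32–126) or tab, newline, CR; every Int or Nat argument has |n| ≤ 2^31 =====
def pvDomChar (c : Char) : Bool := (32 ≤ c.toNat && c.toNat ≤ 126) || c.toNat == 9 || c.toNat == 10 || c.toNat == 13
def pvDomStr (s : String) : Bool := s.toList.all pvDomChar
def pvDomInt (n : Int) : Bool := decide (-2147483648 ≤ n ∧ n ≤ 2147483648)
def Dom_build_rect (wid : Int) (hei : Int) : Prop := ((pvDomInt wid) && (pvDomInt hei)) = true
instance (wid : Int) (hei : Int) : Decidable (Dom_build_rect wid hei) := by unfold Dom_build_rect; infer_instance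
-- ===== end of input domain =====

-- B builds the grid column-wise and transposes with zip, instead of A's row-by-row append loops; objective: alternative.

-- ===== PORT A =====
def build_rect (wid : Int) (hei : Int) : List (List String) :=
  -- asserts wid >= 3, hei >= 3 are Pre_build_rect
  let lst : List String := []
  let lst := lst ++ [" "]
  let lst := (PySem.List.pyRange 0 (wid - 2) 1).foldl (fun l _ => l ++ ["T"]) lst
  let lst := lst ++ [" "]
  let data : List (List String) := [lst]
  let data := (PySem.List.pyRange 0 (hei - 1) 1).foldl (fun d i =>
      if i ≥ 1 then
        d ++ [(PySem.List.pyRange 0 wid 1).foldl (fun l j =>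
                if j < 1 then l ++ ["L"]
                else if j > wid - 2 then l ++ ["R"]
                else l ++ ["."]) []]
      else d) data
  let lst2 : List String := []
  let lst2 := lst2 ++ [" "]
  let lst2 := (PySem.List.pyRange 0 (wid - 2) 1).foldl (fun l _ => l ++ ["B"]) lst2
  let lst2 := lst2 ++ [" "]
  data ++ [lst2]

-- ===== PORT B =====
-- exact port of Python's zip(*cols) (rows of tuples, here lists): emit the heads of all
-- columns, recurse on the tails, stop as soon as any column is exhausted
def pyZipT (cols : List (List String)) : List (List String) :=
  if h : cols ≠ [] ∧ ∀ c ∈ cols, c ≠ [] then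
    (cols.map (fun c => c.headD "")) :: pyZipT (cols.map List.tail)
  else []
termination_by (cols.headD []).length
decreasing_by
  obtain ⟨hne, hall⟩ := h
  cases cols with
  | nil => exact absurd rfl hne
  | cons c cs =>
      have hc : c ≠ [] := hall c (List.mem_cons_self ..)
      cases c with
      | nil => exact absurd rfl hc
      | cons x xs => simp

def build_rect_alt (wid : Int) (hei : Int) : List (List String) :=
  -- asserts wid >= 3, hei >= 3 are Pre_build_rect
  let left : List String := [" "] ++ List.replicate (hei - 2).toNat "L" ++ [" "]
  let mid : List String := ["T"] ++ List.replicate (hei - 2).toNat "." ++ ["B"]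
  let right : List String := [" "] ++ List.replicate (hei - 2).toNat "R" ++ [" "]
  let cols := [left] ++ List.replicate (wid - 2).toNat mid ++ [right]
  pyZipT cols

-- ===== PRECONDITION & SPEC =====
-- Pre_: the two asserts in A (and B) raise AssertionError for wid < 3 or hei < 3.
def Pre_build_rect (wid : Int) (hei : Int) : Prop := 3 ≤ wid ∧ 3 ≤ hei
instance (wid : Int) (hei : Int) : Decidable (Pre_build_rect wid hei) := by
  unfold Pre_build_rect; infer_instance

def pvWitness_build_rect : Int × Int := (3, 3)

def Spec_build_rect (wid : Int) (hei : Int) (out : List (List String)) : Prop := out = build_rect_alt wid hei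
instance (wid : Int) (hei : Int) (out : List (List String)) : Decidable (Spec_build_rect wid hei out) := by unfold Spec_build_rect; infer_instance

-- ===== CLAIM (what is proved, stated in full; the proofs are below) =====
def Claim_equal_build_rect : Prop := ∀ (wid : Int) (hei : Int), Dom_build_rect wid hei → Pre_build_rect wid hei → Spec_build_rect wid hei (build_rect wid hei)

-- ===== LEMMAS AND PROOFS =====

-- appending a constant element once per list element is list replication
theorem rep_fold {α β : Type} (x : α) :
    ∀ (L : List β) (acc : List α),
      L.foldl (fun l _ => l ++ [x]) acc = acc ++ List.replicate L.length x := by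
  intro L
  induction L with
  | nil => intro acc; simp
  | cons h t ih =>
      intro acc
      simp [List.foldl, ih, List.replicate_succ]

-- A's inner middle-row loop produces 'L', then dots, then 'R'
theorem mid_row (wid : Int) (h : 3 ≤ wid) :
    (PySem.List.pyRange 0 wid 1).foldl (fun l j =>
        if j < 1 then l ++ ["L"]
        else if j > wid - 2 then l ++ ["R"]
        else l ++ ["."]) ([] : List String)
      = ["L"] ++ List.replicate (wid - 2).toNat "." ++ ["R"] := by
  have h2 : PySem.List.pyRange (wid - 1) wid 1 = [wid - 1] := by
    have := PySem.List.pyRange_one_singleton (wid - 1)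
    rw [show wid - 1 + 1 = wid by ring] at this
    exact this
  have h1 : PySem.List.pyRange 0 1 1 = [0] := by
    have := PySem.List.pyRange_one_singleton (0 : Int)
    norm_num at this
    exact this
  have hmid : ∀ acc : List String,
      (PySem.List.pyRange 1 (wid - 1) 1).foldl (fun l j =>
          if j < 1 then l ++ ["L"]
          else if j > wid - 2 then l ++ ["R"]
          else l ++ ["."]) acc = acc ++ List.replicate (wid - 2).toNat "." := by
    intro acc
    rw [PySem.List.foldl_congr_mem (PySem.List.pyRange 1 (wid - 1) 1) _
        (fun l _ => l ++ ["."]) acc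
        (by
          intro acc2 x hx
          have hmem := (PySem.List.mem_pyRange_one).1 hx
          have hx1 : ¬ x < 1 := by omega
          have hx2 : ¬ x > wid - 2 := by omega
          simp [hx1, hx2])]
    rw [rep_fold, PySem.List.length_pyRange_one,
        show wid - 1 - 1 = wid - 2 from by ring]
  rw [PySem.List.pyRange_one_append 0 1 wid (by omega) (by omega),
      PySem.List.pyRange_one_append 1 (wid - 1) wid (by omega) (by omega),
      h1, h2, List.foldl_append, List.foldl_append]
  simp only [List.foldl_cons, List.foldl_nil]
  rw [if_pos (by norm_num : (0 : Int) < 1), List.nil_append, hmid]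
  have a1 : ¬ (wid - 1 < 1) := by omega
  have a2 : wid - 1 > wid - 2 := by omega
  simp [a1, a2]

-- A's outer loop appends the (constant) middle row hei-2 times
theorem outer_loop (hei : Int) (h : 3 ≤ hei) (m : List String) (d : List (List String)) :
    (PySem.List.pyRange 0 (hei - 1) 1).foldl
        (fun d i => if i ≥ 1 then d ++ [m] else d) d
      = d ++ List.replicate (hei - 2).toNat m := by
  have h1 : PySem.List.pyRange 0 1 1 = [0] := by
    have := PySem.List.pyRange_one_singleton (0 : Int)
    norm_num at this
    exact this
  rw [PySem.List.pyRange_one_append 0 1 (hei - 1) (by omega) (by omega),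
      h1, List.foldl_append]
  simp only [List.foldl_cons, List.foldl_nil]
  rw [if_neg (by omega : ¬ ((0 : Int) ≥ 1))]
  rw [PySem.List.foldl_congr_mem (PySem.List.pyRange 1 (hei - 1) 1) _
      (fun d _ => d ++ [m]) d
      (by
        intro acc x hx
        have hmem := (PySem.List.mem_pyRange_one).1 hx
        have hx1 : x ≥ 1 := by omega
        simp [hx1])]
  rw [rep_fold, PySem.List.length_pyRange_one,
      show hei - 1 - 1 = hei - 2 from by ring]

-- transposing columns that are each "n copies of a body char, then a final char"
theorem zipT_rep (ps : List (String × String)) (hps : ps ≠ []) :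
    ∀ n : Nat,
      pyZipT (ps.map (fun p => List.replicate n p.1 ++ [p.2]))
        = List.replicate n (ps.map Prod.fst) ++ [ps.map Prod.snd] := by
  intro n
  induction n with
  | zero =>
      rw [pyZipT]
      rw [dif_pos (by
        constructor
        · simpa using hps
        · intro c hc
          simp at hc
          obtain ⟨a, b, _, rfl⟩ := hc
          simp)]
      have htails : (ps.map (fun p => List.replicate 0 p.1 ++ [p.2])).map List.tail
          = ps.map (fun _ => ([] : List String)) := by
        rw [List.map_map]; rfl
      rw [htails, pyZipT]
      rw [dif_neg (by
        rintro ⟨_, hall⟩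
        obtain ⟨p, hp⟩ := List.exists_mem_of_ne_nil ps hps
        exact hall [] (List.mem_map.2 ⟨p, hp, rfl⟩) rfl)]
      simp [List.map_map, Function.comp]
  | succ n ih =>
      rw [pyZipT]
      rw [dif_pos (by
        constructor
        · simpa using hps
        · intro c hc
          simp at hc
          obtain ⟨a, b, _, rfl⟩ := hc
          simp [List.replicate_succ])]
      have hmap1 : (ps.map (fun p => List.replicate (n+1) p.1 ++ [p.2])).map (fun c => c.headD "")
          = ps.map Prod.fst := by
        rw [List.map_map]; apply List.map_congr_left; intro p _
        simp [List.replicate_succ]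
      have hmap2 : (ps.map (fun p => List.replicate (n+1) p.1 ++ [p.2])).map List.tail
          = ps.map (fun p => List.replicate n p.1 ++ [p.2]) := by
        rw [List.map_map]; apply List.map_congr_left; intro p _
        simp [List.replicate_succ]
      rw [hmap1, hmap2, ih, List.replicate_succ]
      simp

-- B's column-wise build transposes to the canonical row form
theorem alt_canonical (wid hei : Int) :
    build_rect_alt wid hei
      = ([" "] ++ List.replicate (wid - 2).toNat "T" ++ [" "])
        :: List.replicate (hei - 2).toNat (["L"] ++ List.replicate (wid - 2).toNat "." ++ ["R"])
        ++ [[" "] ++ List.replicate (wid - 2).toNat "B" ++ [" "]] := by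
  unfold build_rect_alt
  set k := (wid - 2).toNat with hk
  set m := (hei - 2).toNat with hm
  -- write the columns as a map over (body char, last char) pairs, headed by the top row
  have hcols :
      [[" "] ++ List.replicate m "L" ++ [" "]]
        ++ List.replicate k (["T"] ++ List.replicate m "." ++ ["B"])
        ++ [[" "] ++ List.replicate m "R" ++ [" "]]
      = (((" ", ("L", " ")) :: List.replicate k ("T", (".", "B")) ++ [(" ", ("R", " "))]).map
          (fun p => p.1 :: (List.replicate m p.2.1 ++ [p.2.2]))) := by
    simp [List.map_replicate]
  show pyZipT _ = _
  rw [hcols]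
  set ps := ((" ", ("L", " ")) :: List.replicate k ("T", (".", "B")) ++ [(" ", ("R", " "))]) with hps
  have hpsne : ps ≠ [] := by simp [hps]
  rw [pyZipT]
  rw [dif_pos (by
    constructor
    · simpa using hpsne
    · intro c hc
      simp at hc
      obtain ⟨a, b, d, _, rfl⟩ := hc
      simp)]
  have hmap1 : (ps.map (fun p => p.1 :: (List.replicate m p.2.1 ++ [p.2.2]))).map (fun c => c.headD "")
      = ps.map Prod.fst := by
    rw [List.map_map]; apply List.map_congr_left; intro p _; simp
  have hmap2 : (ps.map (fun p => p.1 :: (List.replicate m p.2.1 ++ [p.2.2]))).map List.tail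
      = (ps.map Prod.snd).map (fun q => List.replicate m q.1 ++ [q.2]) := by
    rw [List.map_map, List.map_map]; apply List.map_congr_left; intro p _; simp
  rw [hmap1, hmap2, zipT_rep (ps.map Prod.snd) (by simp [hps])]
  simp [hps, List.map_replicate]

-- ===== VERDICT (by name: the statement is the Claim_ definition above) =====
theorem build_rect_spec : Claim_equal_build_rect := by
  intro wid hei _ hpre
  obtain ⟨hw, hh⟩ := hpre
  unfold Spec_build_rect build_rect
  simp only []
  rw [rep_fold, rep_fold, mid_row wid hw, outer_loop hei hh, alt_canonical wid hei]
  simp [PySem.List.length_pyRange_one]
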